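-- pv_equiv track=rewrite | github.com/JohnChen0/bench-o-matic | bom.py | get_chrome_run_last
-- ===== SOURCE A (Python) =====
-- def get_chrome_run_last(browser_keys):
--     run_order = []
--     for key in browser_keys:
--         if 'Chrome' not in key:
--             run_order.append(key)
--     for key in browser_keys:
--         if 'Chrome' in key:
--             run_order.append(key)
--     return run_order
-- ===== SOURCE B (Python) =====
-- def get_chrome_run_last(browser_keys):
--     return sorted(browser_keys, key=lambda k: 'Chrome' in k)
-- ===== Notes on version B (the rewrite author's own statement) =====
-- stated objective: idiomatic
-- what changed: Replaces A's two explicit filtering passes with a single stable sort on the boolean key 'Chrome' in k, which puts non-Chrome keys first and Chrome keys last while preserving original order within each group.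
import Mathlib
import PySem

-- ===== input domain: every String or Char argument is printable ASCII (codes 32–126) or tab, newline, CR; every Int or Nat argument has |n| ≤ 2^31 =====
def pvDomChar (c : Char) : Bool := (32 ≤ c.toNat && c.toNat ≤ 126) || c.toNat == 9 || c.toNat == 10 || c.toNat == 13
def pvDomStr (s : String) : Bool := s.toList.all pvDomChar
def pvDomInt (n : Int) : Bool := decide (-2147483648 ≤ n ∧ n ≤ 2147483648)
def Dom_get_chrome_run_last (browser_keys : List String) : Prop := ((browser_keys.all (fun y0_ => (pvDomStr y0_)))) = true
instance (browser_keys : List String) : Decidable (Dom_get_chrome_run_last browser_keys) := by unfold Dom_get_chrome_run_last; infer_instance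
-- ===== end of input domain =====

-- B replaces A's two filtering passes with one stable sort on the boolean key 'Chrome' in k (idiomatic; same behaviour).

-- ===== PORT A =====
def get_chrome_run_last (browser_keys : List String) : List String :=
  let run_order :=
    browser_keys.foldl
      (fun acc key => if !(PySem.Str.isIn "Chrome" key) then acc ++ [key] else acc) []
  browser_keys.foldl
    (fun acc key => if PySem.Str.isIn "Chrome" key then acc ++ [key] else acc) run_order

-- ===== PORT B =====
def get_chrome_run_last_alt (browser_keys : List String) : List String :=
  PySem.List.sorted browser_keys (fun k => PySem.Str.isIn "Chrome" k) false

-- ===== PRECONDITION & SPEC =====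
def Spec_get_chrome_run_last (browser_keys : List String) (out : List String) : Prop := out = get_chrome_run_last_alt browser_keys
instance (browser_keys : List String) (out : List String) : Decidable (Spec_get_chrome_run_last browser_keys out) := by unfold Spec_get_chrome_run_last; infer_instance

-- ===== CLAIM (what is proved, stated in full; the proofs are below) =====
def Claim_equal_get_chrome_run_last : Prop := ∀ (browser_keys : List String), Dom_get_chrome_run_last browser_keys → Spec_get_chrome_run_last browser_keys (get_chrome_run_last browser_keys)

-- ===== LEMMAS AND PROOFS =====

-- Inserting into a list split as (all-false keys) ++ (all-true keys): a false-key
-- element lands between the groups, a true-key element at the very end.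
theorem insertBy_bool_split {α : Type} (key : α → Bool) (x : α) (A B : List α)
    (hA : ∀ a ∈ A, key a = false) (hB : ∀ b ∈ B, key b = true) :
    PySem.List.insertBy (fun a b => decide (key a < key b)) x (A ++ B) =
      if key x then A ++ B ++ [x] else A ++ x :: B := by
  by_cases hx : key x = true
  · rw [if_pos hx]
    have hnb : ∀ y ∈ A ++ B, (fun a b => decide (key a < key b)) x y = false := by
      intro y hy
      rcases List.mem_append.mp hy with h | h
      · simp [hx, hA y h]
      · simp [hx, hB y h]
    rw [PySem.List.insertBy_of_forall_not_before _ _ _ hnb]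
  · rw [if_neg hx]
    simp only [Bool.not_eq_true] at hx
    induction A with
    | nil =>
      cases B with
      | nil => simp [PySem.List.insertBy]
      | cons b bs =>
        have hb := hB b (by simp)
        simp [PySem.List.insertBy, hx, hb]
    | cons a as ih =>
      have ha := hA a (by simp)
      simp only [List.cons_append, PySem.List.insertBy, hx, ha]
      simp only [decide_eq_true_eq]
      rw [if_neg (by simp)]
      rw [ih (fun a' h => hA a' (by simp [h]))]

-- Loop invariant for the insertion-sort fold with a boolean key.
theorem foldl_insertBy_bool {α : Type} (key : α → Bool) (xs A B : List α)
    (hA : ∀ a ∈ A, key a = false) (hB : ∀ b ∈ B, key b = true) :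
    xs.foldl (fun acc x => PySem.List.insertBy (fun a b => decide (key a < key b)) x acc) (A ++ B) =
      (A ++ xs.filter (fun x => !key x)) ++ (B ++ xs.filter (fun x => key x)) := by
  induction xs generalizing A B with
  | nil => simp
  | cons x xs ih =>
    simp only [List.foldl_cons]
    rw [insertBy_bool_split key x A B hA hB]
    by_cases hx : key x = true
    · rw [if_pos hx]
      rw [List.append_assoc A B [x], ih A (B ++ [x]) hA
        (by intro b hb; rcases List.mem_append.mp hb with h | h
            · exact hB b h
            · simp at h; subst h; exact hx)]
      simp [hx]
    · simp only [Bool.not_eq_true] at hx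
      rw [if_neg (by simp [hx])]
      have : A ++ x :: B = (A ++ [x]) ++ B := by simp
      rw [this, ih (A ++ [x]) B
        (by intro a ha; rcases List.mem_append.mp ha with h | h
            · exact hA a h
            · simp at h; subst h; exact hx) hB]
      simp [hx]

-- sorted with a boolean key IS the stable partition: false-key elements first.
theorem sorted_bool_eq_partition {α : Type} (key : α → Bool) (xs : List α) :
    PySem.List.sorted xs key false =
      xs.filter (fun x => !key x) ++ xs.filter (fun x => key x) := by
  show xs.foldl (fun acc x => PySem.List.insertBy (fun a b => decide (key a < key b)) x acc) [] = _
  have := foldl_insertBy_bool key xs [] [] (by simp) (by simp)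
  simpa using this

-- ===== VERDICT (by name: the statement is the Claim_ definition above) =====
theorem get_chrome_run_last_spec : Claim_equal_get_chrome_run_last := by
  intro browser_keys _
  show get_chrome_run_last browser_keys = get_chrome_run_last_alt browser_keys
  unfold get_chrome_run_last get_chrome_run_last_alt
  rw [sorted_bool_eq_partition]
  rw [PySem.List.foldl_append_if_eq_filter, PySem.List.foldl_append_if_eq_filter]
  rfl
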